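-- pv_equiv track=rewrite | github.com/hyunjun/practice | python/problem-matrix/number_of_enclaves.py | numEnclaves1
-- ===== SOURCE A (Python) =====
-- def numEnclaves1(A):
--     if A is None or 0 == len(A) or 0 == len(A[0]):
--         return 0
--     R, C = len(A), len(A[0])
--     if 1 == R or 1 == C:
--         return 0
--
--     def bfs(row, col):
--         cnt, q = 0, [(row, col)]
--         while q:
--             r, c = q.pop(0)
--             if r <= 0 or R - 1 <= r or c <= 0 or C - 1 <= c or 0 == A[r][c]:
--                 continue
--             cnt += 1
--             A[r][c] = 0
--             for _r, _c in [(r - 1, c), (r + 1, c), (r, c - 1), (r, c + 1)]: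
--                 q.append((_r, _c))
--         return cnt
--
--     for c in range(1, C - 1):
--         if A[0][c] == 1 and A[1][c] == 1:
--             bfs(1, c)
--         if A[R - 1][c] == 1 and A[R - 2][c] == 1:
--             bfs(R - 2, c)
--     for r in range(1, R - 1):
--         if A[r][0] == 1 and A[r][1] == 1:
--             bfs(r, 1)
--         if A[r][C - 1] == 1 and A[r][C - 2] == 1:
--             bfs(r, C - 2)
--
--     ret = 0
--     for r in range(1, R - 1):
--         for c in range(1, C - 1):
--             ret += bfs(r, c)
--     return ret
-- ===== SOURCE B (Python) =====
-- # B: build the border-seed list once from the original grid with comprehensions, mark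
-- # border-connected interior land in ONE stack flood into a coordinate set (A is NOT
-- # mutated, unlike the original which zeroes A in place), then count the surviving
-- # interior land cells with a single comprehension.
-- def numEnclaves1(A):
--     if A is None or 0 == len(A) or 0 == len(A[0]):
--         return 0
--     R, C = len(A), len(A[0])
--     if 1 == R or 1 == C:
--         return 0
--     seeds = [(1, c) for c in range(1, C - 1) if A[0][c] == 1 and A[1][c] == 1]
--     seeds += [(R - 2, c) for c in range(1, C - 1) if A[R - 1][c] == 1 and A[R - 2][c] == 1]
--     seeds += [(r, 1) for r in range(1, R - 1) if A[r][0] == 1 and A[r][1] == 1]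
--     seeds += [(r, C - 2) for r in range(1, R - 1) if A[r][C - 1] == 1 and A[r][C - 2] == 1]
--     removed = set()
--     stack = seeds
--     while stack:
--         r, c = stack.pop()
--         if 0 < r < R - 1 and 0 < c < C - 1 and A[r][c] != 0 and (r, c) not in removed:
--             removed.add((r, c))
--             stack += [(r - 1, c), (r + 1, c), (r, c - 1), (r, c + 1)]
--     return sum(1 for r in range(1, R - 1) for c in range(1, C - 1)
--                if A[r][c] != 0 and (r, c) not in removed)
-- ===== Notes on version B (the rewrite author's own statement) =====
-- stated objective: faster
-- what changed: A removes border-connected components with repeated mutating BFS floods (a queue popped with O(n) pop(0)) and then counts by flooding every interior cell again; B builds the border seed list once with comprehensions on the unmutated grid, marks border-connected land in a single stack flood into a coordinate set, and counts the surviving interior land cells with one comprehension.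
-- outside the precondition, e.g. on numEnclaves1([[0, 0, 0], [0, 0]]): A returns 0, B returns 0
import Mathlib
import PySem

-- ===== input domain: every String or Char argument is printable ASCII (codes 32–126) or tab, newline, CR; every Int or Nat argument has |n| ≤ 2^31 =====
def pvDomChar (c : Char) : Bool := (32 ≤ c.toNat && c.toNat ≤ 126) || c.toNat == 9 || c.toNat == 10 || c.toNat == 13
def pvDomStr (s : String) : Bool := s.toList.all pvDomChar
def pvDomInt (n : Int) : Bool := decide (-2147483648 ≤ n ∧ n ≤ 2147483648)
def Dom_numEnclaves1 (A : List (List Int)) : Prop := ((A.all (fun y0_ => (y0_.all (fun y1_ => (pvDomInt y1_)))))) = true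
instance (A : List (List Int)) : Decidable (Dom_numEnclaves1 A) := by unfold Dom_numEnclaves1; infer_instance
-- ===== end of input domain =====

-- B replaces A's mutating per-seed BFS (queue with pop(0)) by: a seed list built once with
-- comprehensions on the unmutated grid, ONE stack flood into a coordinate SET, and a
-- comprehension count of the surviving interior land cells.  A mutates its argument in
-- place, B does not; the equivalence proved here is about the RETURN value only.

-- ===== PORT A =====
-- A[r][c] reads and in-place writes, as chained Python indexing
def cellGet {α : Type} (d : α) (g : List (List α)) (r c : Int) : α :=
  (PySem.List.pyGet? ((PySem.List.pyGet? g r).getD []) c).getD d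

def cellSet (g : List (List Int)) (r c : Int) (v : Int) : List (List Int) :=
  g.set r.toNat (((g[r.toNat]?).getD []).set c.toNat v)

def pvNbrs (p : Int × Int) : List (Int × Int) :=
  [(p.1 - 1, p.2), (p.1 + 1, p.2), (p.1, p.2 - 1), (p.1, p.2 + 1)]

-- interior index rectangle (fuel bookkeeping only)
def pvInner (R C : Int) : List (Int × Int) :=
  (PySem.List.pyRange 1 (R-1) 1) ×ˢ (PySem.List.pyRange 1 (C-1) 1)

def pvOnes (R C : Int) (g : List (List Int)) : Nat :=
  (pvInner R C).countP (fun p => cellGet 0 g p.1 p.2 != 0)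

-- the while-q loop of A's bfs; fuel (4*#interior-land + |q| strictly decreases) makes it total
def bfsLoop : Nat → Int → Int → List (List Int) → List (Int × Int) → Int → Int × List (List Int)
  | 0, _, _, g, _, cnt => (cnt, g)
  | _+1, _, _, g, [], cnt => (cnt, g)
  | f+1, R, C, g, p :: q, cnt =>
    if p.1 ≤ 0 ∨ R - 1 ≤ p.1 ∨ p.2 ≤ 0 ∨ C - 1 ≤ p.2 ∨ cellGet 0 g p.1 p.2 = 0 then
      bfsLoop f R C g q cnt
    else
      bfsLoop f R C (cellSet g p.1 p.2 0) (q ++ pvNbrs p) (cnt + 1)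

def pvBfs (R C : Int) (g : List (List Int)) (r c : Int) : Int × List (List Int) :=
  bfsLoop (4 * pvOnes R C g + 2) R C g [(r, c)] 0

def numEnclaves1 (A : List (List Int)) : Int :=
  if A.length = 0 ∨ ((A[0]?).getD []).length = 0 then 0 else
  let R : Int := A.length
  let C : Int := ((A[0]?).getD []).length
  if R = 1 ∨ C = 1 then 0 else
  let g1 := (PySem.List.pyRange 1 (C-1) 1).foldl (fun g c =>
      let g := if cellGet 0 g 0 c = 1 ∧ cellGet 0 g 1 c = 1 then (pvBfs R C g 1 c).2 else g
      if cellGet 0 g (R-1) c = 1 ∧ cellGet 0 g (R-2) c = 1 then (pvBfs R C g (R-2) c).2 else g) A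
  let g2 := (PySem.List.pyRange 1 (R-1) 1).foldl (fun g r =>
      let g := if cellGet 0 g r 0 = 1 ∧ cellGet 0 g r 1 = 1 then (pvBfs R C g r 1).2 else g
      if cellGet 0 g r (C-1) = 1 ∧ cellGet 0 g r (C-2) = 1 then (pvBfs R C g r (C-2)).2 else g) g1
  let res := (PySem.List.pyRange 1 (R-1) 1).foldl (fun (s : Int × List (List Int)) r =>
      (PySem.List.pyRange 1 (C-1) 1).foldl (fun (s : Int × List (List Int)) c =>
        let t := pvBfs R C s.2 r c
        (s.1 + t.1, t.2)) s) (0, g2)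
  res.1

-- ===== PORT B =====
-- Source B's while-stack loop: the stack is kept top-first (Python pops from the END), so
-- `stack += [(r-1,c),(r+1,c),(r,c-1),(r,c+1)]` prepends those four in reverse and the
-- initial stack is `seeds` reversed; `removed` is a Python set of coordinates.
-- Fuel: 5*#interior-cells + |stack| strictly decreases.
def floodSet : Nat → Int → Int → List (List Int) → List (Int × Int) → PySem.Set (Int × Int) → PySem.Set (Int × Int)
  | 0, _, _, _, _, vis => vis
  | _+1, _, _, _, [], vis => vis
  | f+1, R, C, g, p :: st, vis =>
    if 0 < p.1 ∧ p.1 < R - 1 ∧ 0 < p.2 ∧ p.2 < C - 1 ∧ cellGet 0 g p.1 p.2 ≠ 0 ∧ p ∉ vis then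
      floodSet f R C g
        ((p.1, p.2 + 1) :: (p.1, p.2 - 1) :: (p.1 + 1, p.2) :: (p.1 - 1, p.2) :: st)
        (PySem.Set.add vis p)
    else
      floodSet f R C g st vis

def numEnclaves1_alt (A : List (List Int)) : Int :=
  if A.length = 0 ∨ ((A[0]?).getD []).length = 0 then 0 else
  let R : Int := A.length
  let C : Int := ((A[0]?).getD []).length
  if R = 1 ∨ C = 1 then 0 else
  let seeds : List (Int × Int) :=
    ((PySem.List.pyRange 1 (C-1) 1).filter
        (fun c => cellGet 0 A 0 c == 1 && cellGet 0 A 1 c == 1)).map (fun c => ((1 : Int), c))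
    ++ ((PySem.List.pyRange 1 (C-1) 1).filter
        (fun c => cellGet 0 A (R-1) c == 1 && cellGet 0 A (R-2) c == 1)).map (fun c => (R-2, c))
    ++ ((PySem.List.pyRange 1 (R-1) 1).filter
        (fun r => cellGet 0 A r 0 == 1 && cellGet 0 A r 1 == 1)).map (fun r => (r, (1 : Int)))
    ++ ((PySem.List.pyRange 1 (R-1) 1).filter
        (fun r => cellGet 0 A r (C-1) == 1 && cellGet 0 A r (C-2) == 1)).map (fun r => (r, C-2))
  let removed := floodSet (5 * (pvInner R C).length + seeds.length + 1) R C A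
    seeds.reverse PySem.Set.empty
  ((((PySem.List.pyRange 1 (R-1) 1) ×ˢ (PySem.List.pyRange 1 (C-1) 1)).countP
      (fun p => cellGet 0 A p.1 p.2 != 0 && !(PySem.Set.contains removed p)) : Nat) : Int)

-- ===== PRECONDITION & SPEC =====
-- Pre_ excludes ragged grids in which some row is shorter than the first row while the
-- grid has at least 2 rows and 2 columns: on almost all of those A raises IndexError
-- (and B raises likewise); on the rare ones whose missing cells happen never to be read
-- both programs still agree, so the exclusion is slightly wider than the crashes.
def Pre_numEnclaves1 (A : List (List Int)) : Prop :=
  A.length ≤ 1 ∨ ((A[0]?).getD []).length ≤ 1 ∨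
    ∀ row ∈ A, ((A[0]?).getD []).length ≤ row.length
instance (A : List (List Int)) : Decidable (Pre_numEnclaves1 A) := by
  unfold Pre_numEnclaves1; infer_instance

def pvWitness_numEnclaves1 : List (List Int) := [[1,1,1,1],[1,0,1,1],[1,1,0,1],[1,1,1,1]]

def Spec_numEnclaves1 (A : List (List Int)) (out : Int) : Prop := out = numEnclaves1_alt A
instance (A : List (List Int)) (out : Int) : Decidable (Spec_numEnclaves1 A out) := by
  unfold Spec_numEnclaves1; infer_instance

-- ===== CLAIM (what is proved, stated in full; the proofs are below) =====
def Claim_equal_numEnclaves1 : Prop :=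
  ∀ (A : List (List Int)), Dom_numEnclaves1 A → Pre_numEnclaves1 A →
    Spec_numEnclaves1 A (numEnclaves1 A)

-- ===== LEMMAS AND PROOFS =====

-- index rectangle and well-formedness
def pvInR (R C : Int) (q : Int × Int) : Prop :=
  0 ≤ q.1 ∧ q.1 < R ∧ 0 ≤ q.2 ∧ q.2 < C

def pvGood {α : Type} (R C : Int) (g : List (List α)) : Prop :=
  (g.length : Int) = R ∧ ∀ row ∈ g, (C : Int) ≤ (row.length : Int)

-- the cells A's bfs guard lets through: strictly interior, nonzero
def okP (R C : Int) (g : List (List Int)) (p : Int × Int) : Prop :=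
  0 < p.1 ∧ p.1 < R - 1 ∧ 0 < p.2 ∧ p.2 < C - 1 ∧ cellGet 0 g p.1 p.2 ≠ 0

-- reachability through `live` cells along 4-adjacency
inductive pvReach (live : Int × Int → Prop) : (Int × Int) → (Int × Int) → Prop
  | refl (p : Int × Int) : live p → pvReach live p p
  | step (p p' q : Int × Int) : live p → p' ∈ pvNbrs p → pvReach live p' q → pvReach live p q

def pvReachAny (live : Int × Int → Prop) (ps : List (Int × Int)) (q : Int × Int) : Prop :=
  ∃ p ∈ ps, pvReach live p q

theorem pvReach_live_left {live : Int × Int → Prop} {p q : Int × Int}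
    (h : pvReach live p q) : live p := by
  cases h <;> assumption

theorem pvReach_live_right {live : Int × Int → Prop} {p q : Int × Int}
    (h : pvReach live p q) : live q := by
  induction h with
  | refl _ h => exact h
  | step _ _ _ _ _ _ ih => exact ih

theorem pvReach_mono {live live' : Int × Int → Prop} (hm : ∀ x, live' x → live x)
    {p q : Int × Int} (h : pvReach live' p q) : pvReach live p q := by
  induction h with
  | refl p h => exact .refl p (hm _ h)
  | step p p' q h hn _ ih => exact .step p p' q (hm _ h) hn ih

theorem pvReach_trans {live : Int × Int → Prop} {p q s : Int × Int}
    (h1 : pvReach live p q) (h2 : pvReach live q s) : pvReach live p s := by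
  induction h1 with
  | refl _ _ => exact h2
  | step p p' q h hn _ ih => exact .step p p' s h hn (ih h2)

-- removing a reach-closed set Z: a path either stays clear of Z or its target is in Z
theorem pvReach_avoid {live : Int × Int → Prop} {Z : Int × Int → Prop}
    (hZ : ∀ z q, Z z → pvReach live z q → Z q) {p q : Int × Int}
    (h : pvReach live p q) : pvReach (fun x => live x ∧ ¬ Z x) p q ∨ Z q := by
  induction h with
  | refl p hp =>
    by_cases hzp : Z p
    · exact Or.inr hzp
    · exact Or.inl (.refl p ⟨hp, hzp⟩)
  | step p p' q hp hn hr ih =>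
    rcases ih with ih | ih
    · by_cases hzp : Z p
      · exact Or.inr (hZ p q hzp (.step p p' q hp hn hr))
      · exact Or.inl (.step p p' q ⟨hp, hzp⟩ hn ih)
    · exact Or.inr ih

-- removing a single live cell p
theorem pvReach_avoid_one {live : Int × Int → Prop} {p x q : Int × Int} (hp : live p)
    (h : pvReach live x q) :
    pvReach (fun y => live y ∧ y ≠ p) x q ∨ q = p ∨
      ∃ n ∈ pvNbrs p, pvReach (fun y => live y ∧ y ≠ p) n q := by
  induction h with
  | refl x hx =>
    by_cases hxp : x = p
    · exact Or.inr (Or.inl hxp)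
    · exact Or.inl (.refl x ⟨hx, hxp⟩)
  | step x x' q hx hn hr ih =>
    rcases ih with ih | ih | ih
    · by_cases hxp : x = p
      · exact Or.inr (Or.inr ⟨x', hxp ▸ hn, ih⟩)
      · exact Or.inl (.step x x' q ⟨hx, hxp⟩ hn ih)
    · exact Or.inr (Or.inl ih)
    · exact Or.inr (Or.inr ih)

theorem pvReach_one_unfold {live : Int × Int → Prop} {p q : Int × Int} (hp : live p) :
    pvReach live p q ↔ (q = p ∨ ∃ n ∈ pvNbrs p, pvReach (fun y => live y ∧ y ≠ p) n q) := by
  constructor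
  · intro h
    rcases pvReach_avoid_one hp h with h' | h' | h'
    · exact absurd (pvReach_live_left h').2 (by simp)
    · exact Or.inl h'
    · exact Or.inr h'
  · rintro (rfl | ⟨n, hn, hr⟩)
    · exact .refl _ hp
    · exact .step _ n _ hp hn (pvReach_mono (fun y hy => hy.1) hr)

-- ===== grid-access facts =====

theorem cellGet_eq_getElem {α : Type} {R C : Int} {g : List (List α)} (d : α)
    (hg : pvGood R C g) {r c : Int} (h : pvInR R C (r, c)) :
    ∃ row, g[r.toNat]? = some row ∧ c.toNat < row.length ∧
      cellGet d g r c = row[c.toNat]?.getD d := by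
  obtain ⟨hR, hrows⟩ := hg
  have hr0 : (0:Int) ≤ r := h.1
  have hrR : r < R := h.2.1
  have hc0 : (0:Int) ≤ c := h.2.2.1
  have hcC : c < C := h.2.2.2
  have hr : r.toNat < g.length := by omega
  have hrow : g[r.toNat]? = some g[r.toNat] := List.getElem?_eq_getElem hr
  have hlen := hrows _ (List.getElem_mem hr)
  refine ⟨g[r.toNat], hrow, by omega, ?_⟩
  rw [cellGet, PySem.List.pyGet?_of_nonneg g hr0, hrow, Option.getD_some,
    PySem.List.pyGet?_of_nonneg _ hc0]

theorem pvGood_cellSet {R C : Int} {g : List (List Int)} {r c : Int} {v : Int}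
    (hg : pvGood R C g) : pvGood R C (cellSet g r c v) := by
  obtain ⟨hR, hrows⟩ := hg
  by_cases hr : r.toNat < g.length
  · refine ⟨by simp [cellSet, hR], ?_⟩
    intro row hrow
    rcases List.mem_or_eq_of_mem_set hrow with hmem | rfl
    · exact hrows _ hmem
    · have : g[r.toNat]? = some g[r.toNat] := List.getElem?_eq_getElem hr
      rw [cellSet] at *
      have hlen := hrows _ (List.getElem_mem hr)
      simp [this]
      omega
  · unfold cellSet
    rw [List.set_eq_of_length_le (by omega)]
    exact ⟨hR, hrows⟩

theorem cellGet_cellSet {R C : Int} {g : List (List Int)} (d : Int) {r c r' c' : Int}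
    {v : Int} (hg : pvGood R C g) (h : pvInR R C (r, c)) (h' : pvInR R C (r', c')) :
    cellGet d (cellSet g r c v) r' c' = if r' = r ∧ c' = c then v else cellGet d g r' c' := by
  obtain ⟨row, hrow, hc, hget⟩ := cellGet_eq_getElem d hg h
  obtain ⟨hR, hrows⟩ := hg
  have hr0 : (0:Int) ≤ r := h.1
  have hrR : r < R := h.2.1
  have hc0 : (0:Int) ≤ c := h.2.2.1
  have hcC : c < C := h.2.2.2
  have hr0' : (0:Int) ≤ r' := h'.1
  have hrR' : r' < R := h'.2.1
  have hc0' : (0:Int) ≤ c' := h'.2.2.1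
  have hcC' : c' < C := h'.2.2.2
  have hrlen : r.toNat < g.length := by omega
  have hrlen' : r'.toNat < g.length := by omega
  simp only [cellGet, cellSet, PySem.List.pyGet?_of_nonneg _ hr0',
    PySem.List.pyGet?_of_nonneg _ hc0']
  rw [List.getElem?_set]
  by_cases hrr : r' = r
  · have : r.toNat = r'.toNat := by omega
    rw [if_pos this, if_pos (by omega)]
    simp only [Option.getD_some, hrow, Option.getD_some]
    rw [List.getElem?_set]
    by_cases hcc : c' = c
    · have : c.toNat = c'.toNat := by omega
      rw [if_pos this, if_pos (by omega)]
      simp [hrr, hcc]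
    · have : c.toNat ≠ c'.toNat := by omega
      rw [if_neg this, if_neg (by simp [hcc])]
      subst hrr
      simp [hrow]
  · have : r.toNat ≠ r'.toNat := by omega
    rw [if_neg this, if_neg (by simp [hrr])]

theorem mem_pvInner {R C : Int} {p : Int × Int} :
    p ∈ pvInner R C ↔ (1 ≤ p.1 ∧ p.1 < R - 1 ∧ 1 ≤ p.2 ∧ p.2 < C - 1) := by
  obtain ⟨a, b⟩ := p
  simp [pvInner, PySem.List.mem_pyRange_one]
  omega

theorem nodup_pvInner {R C : Int} : (pvInner R C).Nodup :=
  List.Nodup.product (PySem.List.nodup_pyRange_one 1 (R-1)) (PySem.List.nodup_pyRange_one 1 (C-1))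

theorem mem_pvInner_inR {R C : Int} {p : Int × Int} (h : p ∈ pvInner R C) :
    pvInR R C (p.1, p.2) := by
  rw [mem_pvInner] at h
  exact ⟨by omega, by omega, by omega, by omega⟩

theorem okP_mem_pvInner {R C : Int} {g : List (List Int)} {p : Int × Int}
    (h : okP R C g p) : p ∈ pvInner R C := by
  rw [mem_pvInner]; obtain ⟨a, b, c, d, _⟩ := h; exact ⟨by omega, b, by omega, d⟩

theorem okP_inR {R C : Int} {g : List (List Int)} {p : Int × Int} (h : okP R C g p) :
    pvInR R C (p.1, p.2) := by
  obtain ⟨a, b, c, d, _⟩ := h; exact ⟨by omega, by omega, by omega, by omega⟩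

-- countP decrement at a single member
theorem countP_flip_one {α : Type} [DecidableEq α] {l : List α} {p : α} {P P' : α → Bool}
    (hn : l.Nodup) (hp : p ∈ l) (hP : P p = true) (hP' : P' p = false)
    (hagree : ∀ x ∈ l, x ≠ p → P' x = P x) : l.countP P' + 1 = l.countP P := by
  induction l with
  | nil => cases hp
  | cons a l ih =>
    rw [List.nodup_cons] at hn
    rcases List.mem_cons.1 hp with rfl | hpl
    · have : l.countP P' = l.countP P := by
        apply List.countP_congr
        intro x hx
        rw [hagree x (List.mem_cons_of_mem _ hx) (fun h => hn.1 (h ▸ hx))]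
      simp [hP, hP', this]
    · have ha : P' a = P a := hagree a List.mem_cons_self (fun h => hn.1 (h ▸ hpl))
      have := ih hn.2 hpl (fun x hx hxp => hagree x (List.mem_cons_of_mem _ hx) hxp)
      simp only [List.countP_cons, ha]
      omega

-- zeroing an ok cell decrements pvOnes
theorem pvOnes_cellSet {R C : Int} {g : List (List Int)} {p : Int × Int}
    (hg : pvGood R C g) (hok : okP R C g p) :
    pvOnes R C (cellSet g p.1 p.2 0) + 1 = pvOnes R C g := by
  unfold pvOnes
  apply countP_flip_one nodup_pvInner (okP_mem_pvInner hok)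
  · simp [hok.2.2.2.2]
  · rw [cellGet_cellSet 0 hg (okP_inR hok) (okP_inR hok), if_pos ⟨rfl, rfl⟩]
    simp
  · intro x hx hne
    rw [cellGet_cellSet 0 hg (okP_inR hok) (mem_pvInner_inR hx),
      if_neg (by simp only [ne_eq, Prod.ext_iff] at hne; tauto)]

-- okP after zeroing cell p
theorem okP_cellSet_zero {R C : Int} {g : List (List Int)} {p : Int × Int}
    (hg : pvGood R C g) (hok : okP R C g p) (x : Int × Int) :
    okP R C (cellSet g p.1 p.2 0) x ↔ (okP R C g x ∧ x ≠ p) := by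
  by_cases hb : 0 < x.1 ∧ x.1 < R - 1 ∧ 0 < x.2 ∧ x.2 < C - 1
  · have hxin : pvInR R C (x.1, x.2) := ⟨by omega, by omega, by omega, by omega⟩
    by_cases hxp : x = p
    · subst hxp
      rw [okP, cellGet_cellSet 0 hg (okP_inR hok) hxin, if_pos ⟨rfl, rfl⟩]
      simp [okP]
    · rw [okP, cellGet_cellSet 0 hg (okP_inR hok) hxin,
        if_neg (by simp only [ne_eq, Prod.ext_iff] at hxp; tauto)]
      simp [okP, hxp]
  · constructor
    · intro hx; exact absurd ⟨hx.1, hx.2.1, hx.2.2.1, hx.2.2.2.1⟩ hb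
    · intro hx; exact absurd ⟨hx.1.1, hx.1.2.1, hx.1.2.2.1, hx.1.2.2.2.1⟩ hb

-- ===== characterization of A's bfs loop =====

theorem bfsLoop_good {f : Nat} {R C : Int} {g : List (List Int)} {st : List (Int × Int)}
    {cnt : Int} (hg : pvGood R C g) : pvGood R C (bfsLoop f R C g st cnt).2 := by
  induction f generalizing g st cnt with
  | zero => simpa [bfsLoop] using hg
  | succ f ih =>
    cases st with
    | nil => simpa [bfsLoop] using hg
    | cons p q =>
      rw [bfsLoop]
      split
      · exact ih hg
      · exact ih (pvGood_cellSet hg)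

theorem bfsLoop_cnt {f : Nat} {R C : Int} {g : List (List Int)} {st : List (Int × Int)}
    {cnt : Int} (hg : pvGood R C g) :
    pvOnes R C (bfsLoop f R C g st cnt).2 ≤ pvOnes R C g ∧
    (bfsLoop f R C g st cnt).1
      = cnt + ((pvOnes R C g : Int) - (pvOnes R C (bfsLoop f R C g st cnt).2 : Int)) := by
  induction f generalizing g st cnt with
  | zero => simp [bfsLoop]
  | succ f ih =>
    cases st with
    | nil => simp [bfsLoop]
    | cons p q =>
      by_cases hcond : p.1 ≤ 0 ∨ R - 1 ≤ p.1 ∨ p.2 ≤ 0 ∨ C - 1 ≤ p.2 ∨ cellGet 0 g p.1 p.2 = 0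
      · rw [bfsLoop, if_pos hcond]
        exact ih hg
      · rw [bfsLoop, if_neg hcond]
        push_neg at hcond
        have hok : okP R C g p :=
          ⟨by omega, by omega, by omega, by omega, hcond.2.2.2.2⟩
        have hdec := pvOnes_cellSet hg hok
        have hih := ih (g := cellSet g p.1 p.2 0) (st := q ++ pvNbrs p) (cnt := cnt + 1)
          (pvGood_cellSet hg)
        exact ⟨by omega, by omega⟩

theorem bfsLoop_char {f : Nat} {R C : Int} {g : List (List Int)} {st : List (Int × Int)}
    {cnt : Int} (hg : pvGood R C g) (hf : 4 * pvOnes R C g + st.length < f)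
    {q : Int × Int} (hq : pvInR R C q) :
    (pvReachAny (okP R C g) st q → cellGet 0 (bfsLoop f R C g st cnt).2 q.1 q.2 = 0) ∧
    (¬ pvReachAny (okP R C g) st q →
      cellGet 0 (bfsLoop f R C g st cnt).2 q.1 q.2 = cellGet 0 g q.1 q.2) := by
  induction f generalizing g st cnt with
  | zero => omega
  | succ f ih =>
    cases st with
    | nil =>
      refine ⟨?_, fun _ => by simp [bfsLoop]⟩
      rintro ⟨x, hx, -⟩
      cases hx
    | cons p st =>
      by_cases hcond : p.1 ≤ 0 ∨ R - 1 ≤ p.1 ∨ p.2 ≤ 0 ∨ C - 1 ≤ p.2 ∨ cellGet 0 g p.1 p.2 = 0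
      · rw [bfsLoop, if_pos hcond]
        have hnok : ¬ okP R C g p := by
          intro hok
          obtain ⟨h1, h2, h3, h4, h5⟩ := hok
          rcases hcond with h | h | h | h | h
          · omega
          · omega
          · omega
          · omega
          · exact h5 h
        have hih := ih (g := g) (st := st) (cnt := cnt) hg (by simp at hf ⊢; omega)
        constructor
        · rintro ⟨x, hx, hr⟩
          rcases List.mem_cons.1 hx with rfl | hx'
          · exact absurd (pvReach_live_left hr) hnok
          · exact hih.1 ⟨x, hx', hr⟩
        · intro hna
          exact hih.2 (fun ⟨x, hx, hr⟩ => hna ⟨x, List.mem_cons_of_mem _ hx, hr⟩)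
      · rw [bfsLoop, if_neg hcond]
        push_neg at hcond
        have hok : okP R C g p :=
          ⟨by omega, by omega, by omega, by omega, hcond.2.2.2.2⟩
        have hdec := pvOnes_cellSet hg hok
        have hokg' := okP_cellSet_zero hg hok
        have hih := ih (g := cellSet g p.1 p.2 0) (st := st ++ pvNbrs p) (cnt := cnt + 1)
          (pvGood_cellSet hg) (by simp [pvNbrs] at hf ⊢; omega)
        have hmono1 : ∀ x y, pvReach (okP R C (cellSet g p.1 p.2 0)) x y →
            pvReach (okP R C g) x y :=
          fun x y h => pvReach_mono (fun z hz => ((hokg' z).1 hz).1) h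
        have hmono2 : ∀ x y, pvReach (fun z => okP R C g z ∧ z ≠ p) x y →
            pvReach (okP R C (cellSet g p.1 p.2 0)) x y :=
          fun x y h => pvReach_mono (fun z hz => (hokg' z).2 hz) h
        have hiff : (pvReachAny (okP R C (cellSet g p.1 p.2 0)) (st ++ pvNbrs p) q ∨ q = p)
            ↔ pvReachAny (okP R C g) (p :: st) q := by
          constructor
          · rintro (⟨x, hx, hr⟩ | rfl)
            · rcases List.mem_append.1 hx with hx' | hx'
              · exact ⟨x, List.mem_cons_of_mem _ hx', hmono1 _ _ hr⟩
              · exact ⟨p, List.mem_cons_self, .step p x q hok hx' (hmono1 _ _ hr)⟩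
            · exact ⟨q, List.mem_cons_self, .refl q hok⟩
          · rintro ⟨x, hx, hr⟩
            rcases List.mem_cons.1 hx with rfl | hx'
            · rcases (pvReach_one_unfold hok).1 hr with rfl | ⟨n, hn, hr'⟩
              · exact Or.inr rfl
              · exact Or.inl ⟨n, List.mem_append.2 (Or.inr hn), hmono2 _ _ hr'⟩
            · rcases pvReach_avoid_one hok hr with hr' | rfl | ⟨n, hn, hr'⟩
              · exact Or.inl ⟨x, List.mem_append.2 (Or.inl hx'), hmono2 _ _ hr'⟩
              · exact Or.inr rfl
              · exact Or.inl ⟨n, List.mem_append.2 (Or.inr hn), hmono2 _ _ hr'⟩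
        constructor
        · intro hS
          by_cases hra : pvReachAny (okP R C (cellSet g p.1 p.2 0)) (st ++ pvNbrs p) q
          · exact hih.1 hra
          · have hqp : q = p := (hiff.2 hS).resolve_left hra
            rw [hih.2 hra, hqp, cellGet_cellSet 0 hg (okP_inR hok) (okP_inR hok),
              if_pos ⟨rfl, rfl⟩]
        · intro hS
          have hra : ¬ pvReachAny (okP R C (cellSet g p.1 p.2 0)) (st ++ pvNbrs p) q :=
            fun h => hS (hiff.1 (Or.inl h))
          have hqp : q ≠ p := fun h => hS (hiff.1 (Or.inr h))
          rw [hih.2 hra, cellGet_cellSet 0 hg (okP_inR hok) hq,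
            if_neg (fun hc => hqp (Prod.ext_iff.mpr hc))]

-- ===== characterization of B's set flood =====

-- #interior cells not yet in the visited set (measure for the induction only)
def pvFresh (R C : Int) (vis : PySem.Set (Int × Int)) : Nat :=
  (pvInner R C).countP (fun p => decide (p ∉ vis))

theorem pvFresh_empty {R C : Int} : pvFresh R C PySem.Set.empty = (pvInner R C).length := by
  apply List.countP_eq_length.mpr
  intro a _
  simp [PySem.Set.empty]

theorem pvFresh_add {R C : Int} {vis : PySem.Set (Int × Int)} {p : Int × Int}
    (hin : p ∈ pvInner R C) (hp : p ∉ vis) :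
    pvFresh R C (PySem.Set.add vis p) + 1 = pvFresh R C vis := by
  unfold pvFresh
  apply countP_flip_one nodup_pvInner hin
  · simp [hp]
  · simp [PySem.Set.mem_add]
  · intro x hx hne
    simp [PySem.Set.mem_add, hne]

theorem floodSet_char {f : Nat} {R C : Int} {g : List (List Int)} {st : List (Int × Int)}
    {vis : PySem.Set (Int × Int)} (hf : 5 * pvFresh R C vis + st.length < f)
    {q : Int × Int} :
    q ∈ floodSet f R C g st vis
      ↔ (q ∈ vis ∨ pvReachAny (fun x => okP R C g x ∧ x ∉ vis) st q) := by
  induction f generalizing st vis with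
  | zero => omega
  | succ f ih =>
    cases st with
    | nil =>
      rw [floodSet]
      simp [pvReachAny]
    | cons p st =>
      by_cases hcond : 0 < p.1 ∧ p.1 < R - 1 ∧ 0 < p.2 ∧ p.2 < C - 1 ∧
          cellGet 0 g p.1 p.2 ≠ 0 ∧ p ∉ vis
      · rw [floodSet, if_pos hcond]
        have hok : okP R C g p := ⟨hcond.1, hcond.2.1, hcond.2.2.1, hcond.2.2.2.1, hcond.2.2.2.2.1⟩
        have hpv : p ∉ vis := hcond.2.2.2.2.2
        have hlp : okP R C g p ∧ p ∉ vis := ⟨hok, hpv⟩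
        have hdec := pvFresh_add (R := R) (C := C) (okP_mem_pvInner hok) hpv
        have hih := ih (st := (p.1, p.2 + 1) :: (p.1, p.2 - 1) :: (p.1 + 1, p.2) ::
            (p.1 - 1, p.2) :: st) (vis := PySem.Set.add vis p)
          (by simp at hf ⊢; omega)
        have hstmem : ∀ x : Int × Int,
            x ∈ ((p.1, p.2 + 1) :: (p.1, p.2 - 1) :: (p.1 + 1, p.2) ::
              (p.1 - 1, p.2) :: st) ↔ (x ∈ pvNbrs p ∨ x ∈ st) := by
          intro x
          simp [pvNbrs]
          tauto
        have hlive' : ∀ x : Int × Int, (okP R C g x ∧ x ∉ PySem.Set.add vis p)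
            ↔ ((okP R C g x ∧ x ∉ vis) ∧ x ≠ p) := by
          intro x
          rw [PySem.Set.mem_add]
          tauto
        have hmono1 : ∀ x y, pvReach (fun z => okP R C g z ∧ z ∉ PySem.Set.add vis p) x y →
            pvReach (fun z => okP R C g z ∧ z ∉ vis) x y :=
          fun x y h => pvReach_mono (fun z hz => ((hlive' z).1 hz).1) h
        have hmono2 : ∀ x y,
            pvReach (fun z => (okP R C g z ∧ z ∉ vis) ∧ z ≠ p) x y →
            pvReach (fun z => okP R C g z ∧ z ∉ PySem.Set.add vis p) x y :=
          fun x y h => pvReach_mono (fun z hz => (hlive' z).2 hz) h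
        have hiff : (pvReachAny (fun z => okP R C g z ∧ z ∉ PySem.Set.add vis p)
              ((p.1, p.2 + 1) :: (p.1, p.2 - 1) :: (p.1 + 1, p.2) :: (p.1 - 1, p.2) :: st) q
              ∨ q = p)
            ↔ pvReachAny (fun z => okP R C g z ∧ z ∉ vis) (p :: st) q := by
          constructor
          · rintro (⟨x, hx, hr⟩ | rfl)
            · rcases (hstmem x).1 hx with hx' | hx'
              · exact ⟨p, List.mem_cons_self, .step p x q hlp hx' (hmono1 _ _ hr)⟩
              · exact ⟨x, List.mem_cons_of_mem _ hx', hmono1 _ _ hr⟩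
            · exact ⟨q, List.mem_cons_self, .refl q hlp⟩
          · rintro ⟨x, hx, hr⟩
            rcases List.mem_cons.1 hx with rfl | hx'
            · rcases (pvReach_one_unfold hlp).1 hr with rfl | ⟨n, hn, hr'⟩
              · exact Or.inr rfl
              · exact Or.inl ⟨n, (hstmem n).2 (Or.inl hn), hmono2 _ _ hr'⟩
            · rcases pvReach_avoid_one hlp hr with hr' | rfl | ⟨n, hn, hr'⟩
              · exact Or.inl ⟨x, (hstmem x).2 (Or.inr hx'), hmono2 _ _ hr'⟩
              · exact Or.inr rfl
              · exact Or.inl ⟨n, (hstmem n).2 (Or.inl hn), hmono2 _ _ hr'⟩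
        rw [hih, PySem.Set.mem_add, ← hiff]
        tauto
      · rw [floodSet, if_neg hcond]
        have hnok : ¬ (okP R C g p ∧ p ∉ vis) := by
          rintro ⟨⟨h1, h2, h3, h4, h5⟩, h6⟩
          exact hcond ⟨h1, h2, h3, h4, h5, h6⟩
        rw [ih (st := st) (vis := vis) (by simp at hf ⊢; omega)]
        constructor
        · rintro (h | ⟨x, hx, hr⟩)
          · exact Or.inl h
          · exact Or.inr ⟨x, List.mem_cons_of_mem _ hx, hr⟩
        · rintro (h | ⟨x, hx, hr⟩)
          · exact Or.inl h
          · rcases List.mem_cons.1 hx with rfl | hx'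
            · exact absurd (pvReach_live_left hr) hnok
            · exact Or.inr ⟨x, hx', hr⟩

-- pvReachAny only depends on the membership of the seed list
theorem pvReachAny_congr {live live' : Int × Int → Prop} {s t : List (Int × Int)}
    (hm : ∀ x, x ∈ s ↔ x ∈ t) (hl : ∀ x, live x ↔ live' x) {q : Int × Int} :
    pvReachAny live s q ↔ pvReachAny live' t q := by
  constructor
  · rintro ⟨x, hx, hr⟩
    exact ⟨x, (hm x).1 hx, pvReach_mono (fun z hz => (hl z).1 hz) hr⟩
  · rintro ⟨x, hx, hr⟩
    exact ⟨x, (hm x).2 hx, pvReach_mono (fun z hz => (hl z).2 hz) hr⟩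

-- membership through a fold that appends conditionally
theorem foldl_mem_step {β γ : Type} (step : List γ → β → List γ) (Q : β → γ → Prop)
    (h : ∀ s b x, x ∈ step s b ↔ (x ∈ s ∨ Q b x)) :
    ∀ (l : List β) (s : List γ) (x : γ),
      x ∈ l.foldl step s ↔ (x ∈ s ∨ ∃ b ∈ l, Q b x) := by
  intro l
  induction l with
  | nil => simp
  | cons a l ih =>
    intro s x
    rw [List.foldl_cons, ih, h]
    simp only [List.exists_mem_cons_iff]
    tauto

-- ===== the border pre-pass: A's mutated grid vs a seed list =====

def pvInv (R C : Int) (g0 h : List (List Int)) (s : List (Int × Int)) : Prop :=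
  pvGood R C h ∧ ∀ q : Int × Int, pvInR R C q →
    (pvReachAny (okP R C g0) s q → cellGet 0 h q.1 q.2 = 0) ∧
    (¬ pvReachAny (okP R C g0) s q → cellGet 0 h q.1 q.2 = cellGet 0 g0 q.1 q.2)

theorem pvBfs_good {R C : Int} {g : List (List Int)} {r c : Int} (hg : pvGood R C g) :
    pvGood R C (pvBfs R C g r c).2 := bfsLoop_good hg

theorem pvBfs_char {R C : Int} {g : List (List Int)} {r c : Int} (hg : pvGood R C g)
    {q : Int × Int} (hq : pvInR R C q) :
    (pvReach (okP R C g) (r, c) q → cellGet 0 (pvBfs R C g r c).2 q.1 q.2 = 0) ∧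
    (¬ pvReach (okP R C g) (r, c) q →
      cellGet 0 (pvBfs R C g r c).2 q.1 q.2 = cellGet 0 g q.1 q.2) := by
  have h := bfsLoop_char (f := 4 * pvOnes R C g + 2) (st := [(r, c)]) (cnt := 0) hg
    (by simp) hq
  constructor
  · intro hr
    exact h.1 ⟨(r, c), List.mem_cons_self, hr⟩
  · intro hr
    refine h.2 ?_
    rintro ⟨x, hx, hrx⟩
    rcases List.mem_cons.1 hx with rfl | hx'
    · exact hr hrx
    · cases hx'

theorem pvBfs_zero_preserve {R C : Int} {g : List (List Int)} {r c : Int}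
    (hg : pvGood R C g) {q : Int × Int} (hq : pvInR R C q)
    (h0 : cellGet 0 g q.1 q.2 = 0) : cellGet 0 (pvBfs R C g r c).2 q.1 q.2 = 0 := by
  by_cases hr : pvReach (okP R C g) (r, c) q
  · exact (pvBfs_char hg hq).1 hr
  · rw [(pvBfs_char hg hq).2 hr, h0]

theorem pvBfs_self_zero {R C : Int} {g : List (List Int)} {r c : Int} (hg : pvGood R C g)
    (hr : 1 ≤ r) (hr' : r < R - 1) (hc : 1 ≤ c) (hc' : c < C - 1) :
    cellGet 0 (pvBfs R C g r c).2 r c = 0 := by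
  have hq : pvInR R C (r, c) := ⟨by omega, by omega, by omega, by omega⟩
  by_cases hok : okP R C g (r, c)
  · exact (pvBfs_char hg hq).1 (.refl _ hok)
  · have h0 : cellGet 0 g r c = 0 := by
      by_contra hne
      exact hok ⟨by omega, by omega, by omega, by omega, hne⟩
    by_cases hre : pvReach (okP R C g) (r, c) (r, c)
    · exact (pvBfs_char hg hq).1 hre
    · rw [(pvBfs_char hg hq).2 hre, h0]

theorem pvBfs_cnt {R C : Int} {g : List (List Int)} {r c : Int} (hg : pvGood R C g) :
    pvOnes R C (pvBfs R C g r c).2 ≤ pvOnes R C g ∧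
    (pvBfs R C g r c).1
      = (pvOnes R C g : Int) - (pvOnes R C (pvBfs R C g r c).2 : Int) := by
  have h := bfsLoop_cnt (f := 4 * pvOnes R C g + 2) (st := [(r, c)]) (cnt := 0) hg
  unfold pvBfs
  exact ⟨h.1, by omega⟩

theorem pvInv_step {R C : Int} {g0 h : List (List Int)} {s : List (Int × Int)}
    (b p : Int × Int) (hInv : pvInv R C g0 h s) (hg0 : pvGood R C g0)
    (hb : ¬ (0 < b.1 ∧ b.1 < R - 1 ∧ 0 < b.2 ∧ b.2 < C - 1))
    (hbIn : pvInR R C b) (hpIn : pvInR R C p) :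
    pvInv R C g0
      (if cellGet 0 h b.1 b.2 = 1 ∧ cellGet 0 h p.1 p.2 = 1
        then (pvBfs R C h p.1 p.2).2 else h)
      (if cellGet 0 g0 b.1 b.2 = 1 ∧ cellGet 0 g0 p.1 p.2 = 1
        then s ++ [p] else s) := by
  obtain ⟨hGoodH, hPt⟩ := hInv
  have hZright : ∀ q, pvReachAny (okP R C g0) s q → okP R C g0 q :=
    fun q ⟨x, _, hr⟩ => pvReach_live_right hr
  have hZclosed : ∀ z q, pvReachAny (okP R C g0) s z → pvReach (okP R C g0) z q →
      pvReachAny (okP R C g0) s q :=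
    fun z q ⟨x, hx, h1⟩ h2 => ⟨x, hx, pvReach_trans h1 h2⟩
  have hbeq : cellGet 0 h b.1 b.2 = cellGet 0 g0 b.1 b.2 := by
    apply (hPt b hbIn).2
    intro hz
    have hzr := hZright b hz
    exact hb ⟨hzr.1, hzr.2.1, hzr.2.2.1, hzr.2.2.2.1⟩
  have hokHiff : ∀ x, okP R C h x ↔
      (okP R C g0 x ∧ ¬ pvReachAny (okP R C g0) s x) := by
    intro x
    by_cases hbx : 0 < x.1 ∧ x.1 < R - 1 ∧ 0 < x.2 ∧ x.2 < C - 1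
    · have hxIn : pvInR R C x := ⟨by omega, by omega, by omega, by omega⟩
      by_cases hzx : pvReachAny (okP R C g0) s x
      · have h0 : cellGet 0 h x.1 x.2 = 0 := (hPt x hxIn).1 hzx
        constructor
        · intro hokh; exact absurd h0 hokh.2.2.2.2
        · rintro ⟨-, hnz⟩; exact absurd hzx hnz
      · have heq := (hPt x hxIn).2 hzx
        constructor
        · intro hokh
          exact ⟨⟨hokh.1, hokh.2.1, hokh.2.2.1, hokh.2.2.2.1, by rw [← heq]; exact hokh.2.2.2.2⟩, hzx⟩
        · rintro ⟨hokg, -⟩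
          exact ⟨hokg.1, hokg.2.1, hokg.2.2.1, hokg.2.2.2.1, by rw [heq]; exact hokg.2.2.2.2⟩
    · constructor
      · intro hokh; exact absurd ⟨hokh.1, hokh.2.1, hokh.2.2.1, hokh.2.2.2.1⟩ hbx
      · rintro ⟨hokg, -⟩; exact absurd ⟨hokg.1, hokg.2.1, hokg.2.2.1, hokg.2.2.2.1⟩ hbx
  by_cases hg0c : cellGet 0 g0 b.1 b.2 = 1 ∧ cellGet 0 g0 p.1 p.2 = 1
  · by_cases hhc : cellGet 0 h b.1 b.2 = 1 ∧ cellGet 0 h p.1 p.2 = 1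
    · rw [if_pos hhc, if_pos hg0c]
      refine ⟨pvBfs_good hGoodH, ?_⟩
      intro q hq
      have hchar := pvBfs_char (r := p.1) (c := p.2) hGoodH hq
      constructor
      · rintro ⟨x, hx, hr⟩
        rcases List.mem_append.1 hx with hx' | hx'
        · exact pvBfs_zero_preserve hGoodH hq ((hPt q hq).1 ⟨x, hx', hr⟩)
        · have hxp : x = p := by simpa using hx'
          subst hxp
          rcases pvReach_avoid (Z := pvReachAny (okP R C g0) s) hZclosed hr with hr' | hz
          · exact hchar.1 (pvReach_mono (fun z hz => (hokHiff z).2 hz) hr')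
          · exact pvBfs_zero_preserve hGoodH hq ((hPt q hq).1 hz)
      · intro hnz
        have hnzs : ¬ pvReachAny (okP R C g0) s q :=
          fun ⟨x, hx, hr⟩ => hnz ⟨x, List.mem_append.2 (Or.inl hx), hr⟩
        have hnrp : ¬ pvReach (okP R C h) (p.1, p.2) q := by
          intro hrh
          exact hnz ⟨p, List.mem_append.2 (Or.inr (List.mem_singleton.2 rfl)),
            pvReach_mono (fun z hz => ((hokHiff z).1 hz).1) hrh⟩
        rw [hchar.2 hnrp]
        exact (hPt q hq).2 hnzs
    · rw [if_neg hhc, if_pos hg0c]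
      have hzp : pvReachAny (okP R C g0) s p := by
        by_contra hnz
        have heq := (hPt p hpIn).2 hnz
        exact hhc ⟨by rw [hbeq]; exact hg0c.1, by rw [heq]; exact hg0c.2⟩
      refine ⟨hGoodH, ?_⟩
      intro q hq
      constructor
      · rintro ⟨x, hx, hr⟩
        rcases List.mem_append.1 hx with hx' | hx'
        · exact (hPt q hq).1 ⟨x, hx', hr⟩
        · have hxp : x = p := by simpa using hx'
          subst hxp
          exact (hPt q hq).1 (hZclosed _ _ hzp hr)
      · intro hnz
        exact (hPt q hq).2 (fun ⟨x, hx, hr⟩ => hnz ⟨x, List.mem_append.2 (Or.inl hx), hr⟩)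
  · rw [if_neg hg0c]
    have hhc : ¬ (cellGet 0 h b.1 b.2 = 1 ∧ cellGet 0 h p.1 p.2 = 1) := by
      rintro ⟨h1, h2⟩
      apply hg0c
      refine ⟨by rw [← hbeq]; exact h1, ?_⟩
      by_cases hzp : pvReachAny (okP R C g0) s p
      · have h0 := (hPt p hpIn).1 hzp
        rw [h0] at h2
        exact absurd h2 (by norm_num)
      · rw [← (hPt p hpIn).2 hzp]
        exact h2
    rw [if_neg hhc]
    exact ⟨hGoodH, hPt⟩

theorem pvInv_fold_cols {R C : Int} {g0 : List (List Int)} (hg0 : pvGood R C g0)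
    (hR : 2 ≤ R) (hC : 2 ≤ C) :
    ∀ (l : List Int), (∀ c ∈ l, 1 ≤ c ∧ c < C - 1) →
    ∀ (h : List (List Int)) (s : List (Int × Int)), pvInv R C g0 h s →
    pvInv R C g0
      (l.foldl (fun g c =>
        let g := if cellGet 0 g 0 c = 1 ∧ cellGet 0 g 1 c = 1 then (pvBfs R C g 1 c).2 else g
        if cellGet 0 g (R-1) c = 1 ∧ cellGet 0 g (R-2) c = 1 then (pvBfs R C g (R-2) c).2 else g) h)
      (l.foldl (fun s c =>
        let s := if cellGet 0 g0 0 c = 1 ∧ cellGet 0 g0 1 c = 1 then s ++ [((1:Int), c)] else s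
        if cellGet 0 g0 (R-1) c = 1 ∧ cellGet 0 g0 (R-2) c = 1 then s ++ [(R-2, c)] else s) s) := by
  intro l
  induction l with
  | nil => exact fun _ _ _ hInv => hInv
  | cons c l ih =>
    intro hmem h s hInv
    simp only [List.foldl_cons]
    apply ih (fun c' hc' => hmem c' (List.mem_cons_of_mem _ hc'))
    have hc := hmem c List.mem_cons_self
    have h1 := pvInv_step (R := R) (C := C) ((0 : Int), c) ((1 : Int), c) hInv hg0
      (by intro hcon; have : (0:Int) < 0 := hcon.1; omega)
      ⟨by omega, by omega, by omega, by omega⟩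
      ⟨by omega, by omega, by omega, by omega⟩
    exact pvInv_step ((R - 1 : Int), c) ((R - 2 : Int), c) h1 hg0
      (by intro hcon; have : (R:Int) - 1 < R - 1 := hcon.2.1; omega)
      ⟨by omega, by omega, by omega, by omega⟩
      ⟨by omega, by omega, by omega, by omega⟩

theorem pvInv_fold_rows {R C : Int} {g0 : List (List Int)} (hg0 : pvGood R C g0)
    (hR : 2 ≤ R) (hC : 2 ≤ C) :
    ∀ (l : List Int), (∀ r ∈ l, 1 ≤ r ∧ r < R - 1) →
    ∀ (h : List (List Int)) (s : List (Int × Int)), pvInv R C g0 h s →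
    pvInv R C g0
      (l.foldl (fun g r =>
        let g := if cellGet 0 g r 0 = 1 ∧ cellGet 0 g r 1 = 1 then (pvBfs R C g r 1).2 else g
        if cellGet 0 g r (C-1) = 1 ∧ cellGet 0 g r (C-2) = 1 then (pvBfs R C g r (C-2)).2 else g) h)
      (l.foldl (fun s r =>
        let s := if cellGet 0 g0 r 0 = 1 ∧ cellGet 0 g0 r 1 = 1 then s ++ [(r, (1:Int))] else s
        if cellGet 0 g0 r (C-1) = 1 ∧ cellGet 0 g0 r (C-2) = 1 then s ++ [(r, C-2)] else s) s) := by
  intro l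
  induction l with
  | nil => exact fun _ _ _ hInv => hInv
  | cons r l ih =>
    intro hmem h s hInv
    simp only [List.foldl_cons]
    apply ih (fun r' hr' => hmem r' (List.mem_cons_of_mem _ hr'))
    have hr := hmem r List.mem_cons_self
    have h1 := pvInv_step (R := R) (C := C) (r, (0 : Int)) (r, (1 : Int)) hInv hg0
      (by intro hcon; have : (0:Int) < 0 := hcon.2.2.1; omega)
      ⟨by omega, by omega, by omega, by omega⟩
      ⟨by omega, by omega, by omega, by omega⟩
    exact pvInv_step (r, (C - 1 : Int)) (r, (C - 2 : Int)) h1 hg0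
      (by intro hcon; have : (C:Int) - 1 < C - 1 := hcon.2.2.2; omega)
      ⟨by omega, by omega, by omega, by omega⟩
      ⟨by omega, by omega, by omega, by omega⟩

-- the counting double loop of A
theorem finalA_inner {R C r : Int} (hr1 : 1 ≤ r) (hr2 : r < R - 1) :
    ∀ (lc : List Int) (s : Int × List (List Int)), pvGood R C s.2 →
    (∀ c ∈ lc, 1 ≤ c ∧ c < C - 1) →
    pvGood R C (lc.foldl (fun (s : Int × List (List Int)) c =>
        let t := pvBfs R C s.2 r c
        (s.1 + t.1, t.2)) s).2 ∧
    pvOnes R C (lc.foldl (fun (s : Int × List (List Int)) c =>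
        let t := pvBfs R C s.2 r c
        (s.1 + t.1, t.2)) s).2 ≤ pvOnes R C s.2 ∧
    (lc.foldl (fun (s : Int × List (List Int)) c =>
        let t := pvBfs R C s.2 r c
        (s.1 + t.1, t.2)) s).1
      = s.1 + ((pvOnes R C s.2 : Int) - (pvOnes R C (lc.foldl (fun (s : Int × List (List Int)) c =>
        let t := pvBfs R C s.2 r c
        (s.1 + t.1, t.2)) s).2 : Int)) ∧
    (∀ q : Int × Int, pvInR R C q → cellGet 0 s.2 q.1 q.2 = 0 →
      cellGet 0 (lc.foldl (fun (s : Int × List (List Int)) c =>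
        let t := pvBfs R C s.2 r c
        (s.1 + t.1, t.2)) s).2 q.1 q.2 = 0) ∧
    (∀ c ∈ lc, cellGet 0 (lc.foldl (fun (s : Int × List (List Int)) c =>
        let t := pvBfs R C s.2 r c
        (s.1 + t.1, t.2)) s).2 r c = 0) := by
  intro lc
  induction lc with
  | nil =>
    intro s hg _
    simp only [List.foldl_nil]
    refine ⟨hg, le_refl _, by omega, fun q _ h0 => h0, fun c hc => absurd hc (by simp)⟩
  | cons c lc ih =>
    intro s hg hmem
    have hc := hmem c List.mem_cons_self
    have hgood' : pvGood R C (pvBfs R C s.2 r c).2 := pvBfs_good hg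
    have hcnt := pvBfs_cnt (r := r) (c := c) hg
    have hih := ih (s.1 + (pvBfs R C s.2 r c).1, (pvBfs R C s.2 r c).2) hgood'
      (fun c' hc' => hmem c' (List.mem_cons_of_mem _ hc'))
    simp only [List.foldl_cons]
    dsimp only at hih ⊢
    refine ⟨hih.1, by omega, by omega, ?_, ?_⟩
    · intro q hq h0
      exact hih.2.2.2.1 q hq (pvBfs_zero_preserve hg hq h0)
    · intro c' hc'
      rcases List.mem_cons.1 hc' with rfl | hc''
      · exact hih.2.2.2.1 (r, c') ⟨by omega, by omega, by omega, by omega⟩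
          (pvBfs_self_zero hg hr1 hr2 hc.1 hc.2)
      · exact hih.2.2.2.2 c' hc''

theorem finalA_outer {R C : Int} :
    ∀ (lr : List Int) (s : Int × List (List Int)), pvGood R C s.2 →
    (∀ r ∈ lr, 1 ≤ r ∧ r < R - 1) →
    pvGood R C (lr.foldl (fun (s : Int × List (List Int)) r =>
        (PySem.List.pyRange 1 (C-1) 1).foldl (fun (s : Int × List (List Int)) c =>
          let t := pvBfs R C s.2 r c
          (s.1 + t.1, t.2)) s) s).2 ∧
    (lr.foldl (fun (s : Int × List (List Int)) r =>
        (PySem.List.pyRange 1 (C-1) 1).foldl (fun (s : Int × List (List Int)) c =>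
          let t := pvBfs R C s.2 r c
          (s.1 + t.1, t.2)) s) s).1
      = s.1 + ((pvOnes R C s.2 : Int) - (pvOnes R C (lr.foldl (fun (s : Int × List (List Int)) r =>
        (PySem.List.pyRange 1 (C-1) 1).foldl (fun (s : Int × List (List Int)) c =>
          let t := pvBfs R C s.2 r c
          (s.1 + t.1, t.2)) s) s).2 : Int)) ∧
    (∀ q : Int × Int, pvInR R C q → cellGet 0 s.2 q.1 q.2 = 0 →
      cellGet 0 (lr.foldl (fun (s : Int × List (List Int)) r =>
        (PySem.List.pyRange 1 (C-1) 1).foldl (fun (s : Int × List (List Int)) c =>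
          let t := pvBfs R C s.2 r c
          (s.1 + t.1, t.2)) s) s).2 q.1 q.2 = 0) ∧
    (∀ q : Int × Int, pvInR R C q → q.1 ∈ lr → 1 ≤ q.2 → q.2 < C - 1 →
      cellGet 0 (lr.foldl (fun (s : Int × List (List Int)) r =>
        (PySem.List.pyRange 1 (C-1) 1).foldl (fun (s : Int × List (List Int)) c =>
          let t := pvBfs R C s.2 r c
          (s.1 + t.1, t.2)) s) s).2 q.1 q.2 = 0) := by
  intro lr
  induction lr with
  | nil =>
    intro s hg _
    simp only [List.foldl_nil]
    exact ⟨hg, by omega, fun q _ h0 => h0, fun q _ hq1 _ _ => absurd hq1 (by simp)⟩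
  | cons r lr ih =>
    intro s hg hmem
    have hr := hmem r List.mem_cons_self
    have hinner := finalA_inner (R := R) (C := C) hr.1 hr.2 (PySem.List.pyRange 1 (C-1) 1) s hg
      (fun c hcm => by rw [PySem.List.mem_pyRange_one] at hcm; omega)
    have hih := ih ((PySem.List.pyRange 1 (C-1) 1).foldl (fun (s : Int × List (List Int)) c =>
          let t := pvBfs R C s.2 r c
          (s.1 + t.1, t.2)) s) hinner.1
      (fun r' hr' => hmem r' (List.mem_cons_of_mem _ hr'))
    simp only [List.foldl_cons]
    dsimp only at hih hinner ⊢
    refine ⟨hih.1, by omega, ?_, ?_⟩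
    · intro q hq h0
      exact hih.2.2.1 q hq (hinner.2.2.2.1 q hq h0)
    · intro q hq hq1 hq2 hq3
      rcases List.mem_cons.1 hq1 with heq | hq1'
      · have h0 : cellGet 0 ((PySem.List.pyRange 1 (C-1) 1).foldl (fun (s : Int × List (List Int)) c =>
            let t := pvBfs R C s.2 r c
            (s.1 + t.1, t.2)) s).2 q.1 q.2 = 0 := by
          rw [heq]
          exact hinner.2.2.2.2 q.2 (PySem.List.mem_pyRange_one.2 ⟨hq2, hq3⟩)
        exact hih.2.2.1 q hq h0
      · exact hih.2.2.2 q hq hq1' hq2 hq3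

theorem pvOnes_eq_zero {R C : Int} {g : List (List Int)}
    (h : ∀ q ∈ pvInner R C, cellGet 0 g q.1 q.2 = 0) : pvOnes R C g = 0 := by
  rw [pvOnes, List.countP_eq_zero]
  intro q hq
  simp [h q hq]

-- A's final value equals B's count, given the seed-set correspondence
theorem mainCore {R C : Int} {g0 g2 : List (List Int)} {sA seedsB : List (Int × Int)}
    (hR2 : 2 ≤ R) (hC2 : 2 ≤ C) (hgood : pvGood R C g0)
    (hInv : pvInv R C g0 g2 sA) (hseed : ∀ x, x ∈ seedsB ↔ x ∈ sA) :
    ((PySem.List.pyRange 1 (R-1) 1).foldl (fun (s : Int × List (List Int)) r =>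
        (PySem.List.pyRange 1 (C-1) 1).foldl (fun (s : Int × List (List Int)) c =>
          let t := pvBfs R C s.2 r c
          (s.1 + t.1, t.2)) s) (0, g2)).1
    = (((pvInner R C).countP
        (fun p => cellGet 0 g0 p.1 p.2 != 0 &&
          !(PySem.Set.contains (floodSet (5 * (pvInner R C).length + seedsB.length + 1)
              R C g0 seedsB.reverse PySem.Set.empty) p)) : Nat) : Int) := by
  have hmemR : ∀ r ∈ PySem.List.pyRange 1 (R - 1) 1, 1 ≤ r ∧ r < R - 1 := by
    intro r hr
    rw [PySem.List.mem_pyRange_one] at hr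
    omega
  have hfin := finalA_outer (R := R) (C := C) (PySem.List.pyRange 1 (R-1) 1) (0, g2)
    hInv.1 hmemR
  have hzero := pvOnes_eq_zero (fun q hq => by
    rw [mem_pvInner] at hq
    exact hfin.2.2.2 q ⟨by omega, by omega, by omega, by omega⟩
      (PySem.List.mem_pyRange_one.2 ⟨hq.1, hq.2.1⟩) hq.2.2.1 hq.2.2.2)
  rw [hfin.2.1, hzero]
  have hcountP : (pvInner R C).countP (fun p => cellGet 0 g2 p.1 p.2 != 0)
      = (pvInner R C).countP
        (fun p => cellGet 0 g0 p.1 p.2 != 0 &&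
          !(PySem.Set.contains (floodSet (5 * (pvInner R C).length + seedsB.length + 1)
              R C g0 seedsB.reverse PySem.Set.empty) p)) := by
    apply List.countP_congr
    intro q hq
    have hqIn : pvInR R C q := mem_pvInner_inR hq
    have hptq := hInv.2 q hqIn
    have hremq : q ∈ floodSet (5 * (pvInner R C).length + seedsB.length + 1)
        R C g0 seedsB.reverse PySem.Set.empty ↔ pvReachAny (okP R C g0) sA q := by
      rw [floodSet_char (by rw [pvFresh_empty, List.length_reverse]; omega)]
      have hlist : ∀ x : Int × Int, x ∈ seedsB.reverse ↔ x ∈ sA := by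
        intro x; rw [List.mem_reverse]; exact hseed x
      have hlive : ∀ x : Int × Int,
          (okP R C g0 x ∧ x ∉ (PySem.Set.empty : PySem.Set (Int × Int))) ↔ okP R C g0 x := by
        intro x; simp [PySem.Set.empty]
      rw [pvReachAny_congr hlist hlive]
      simp [PySem.Set.empty]
    by_cases hZ : pvReachAny (okP R C g0) sA q
    · have h0 : cellGet 0 g2 q.1 q.2 = 0 := hptq.1 hZ
      have hct : PySem.Set.contains (floodSet (5 * (pvInner R C).length + seedsB.length + 1)
          R C g0 seedsB.reverse PySem.Set.empty) q = true := by
        rw [PySem.Set.contains_iff]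
        exact hremq.2 hZ
      rw [hct, h0]
      simp
    · have heq : cellGet 0 g2 q.1 q.2 = cellGet 0 g0 q.1 q.2 := hptq.2 hZ
      have hct : PySem.Set.contains (floodSet (5 * (pvInner R C).length + seedsB.length + 1)
          R C g0 seedsB.reverse PySem.Set.empty) q = false := by
        simp only [Bool.eq_false_iff, ne_eq, PySem.Set.contains_iff]
        exact fun h => hZ (hremq.1 h)
      rw [hct, heq]
      simp
  rw [pvOnes] at *
  rw [hcountP]
  push_cast
  ring

-- ===== the main equivalence =====

set_option maxHeartbeats 2000000 in
theorem numEnclaves1_eq_alt (A : List (List Int)) (hpre : Pre_numEnclaves1 A) :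
    numEnclaves1 A = numEnclaves1_alt A := by
  by_cases h0 : A.length = 0 ∨ ((A[0]?).getD []).length = 0
  · unfold numEnclaves1 numEnclaves1_alt
    simp only [if_pos h0]
  · unfold numEnclaves1 numEnclaves1_alt
    rw [if_neg h0, if_neg h0]
    by_cases h1 : (A.length : Int) = 1 ∨ (((A[0]?).getD []).length : Int) = 1
    · simp only [if_pos h1]
    · rw [if_neg h1, if_neg h1]
      dsimp only
      have ha0 : ¬ A.length = 0 := (not_or.1 h0).1
      have hb0 : ¬ ((A[0]?).getD []).length = 0 := (not_or.1 h0).2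
      have ha1 : ¬ (A.length : Int) = 1 := (not_or.1 h1).1
      have hb1 : ¬ (((A[0]?).getD []).length : Int) = 1 := (not_or.1 h1).2
      have hR2 : 2 ≤ (A.length : Int) := by omega
      have hC2 : 2 ≤ (((A[0]?).getD []).length : Int) := by omega
      have hgood : pvGood (A.length : Int) (((A[0]?).getD []).length : Int) A := by
        refine ⟨rfl, ?_⟩
        rcases hpre with h | h | h
        · omega
        · omega
        · intro row hrow
          exact_mod_cast h row hrow
      have hmemC : ∀ c ∈ PySem.List.pyRange 1 ((((A[0]?).getD []).length : Int) - 1) 1,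
          1 ≤ c ∧ c < (((A[0]?).getD []).length : Int) - 1 := by
        intro c hc
        rw [PySem.List.mem_pyRange_one] at hc
        omega
      have hmemR : ∀ r ∈ PySem.List.pyRange 1 ((A.length : Int) - 1) 1,
          1 ≤ r ∧ r < (A.length : Int) - 1 := by
        intro r hr
        rw [PySem.List.mem_pyRange_one] at hr
        omega
      have hInv0 : pvInv (A.length : Int) (((A[0]?).getD []).length : Int) A A [] := by
        refine ⟨hgood, fun q hq => ⟨?_, fun _ => rfl⟩⟩
        rintro ⟨x, hx, -⟩
        cases hx
      have hInv1 := pvInv_fold_cols hgood hR2 hC2 _ hmemC A [] hInv0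
      have hInv2 := pvInv_fold_rows hgood hR2 hC2 _ hmemR _ _ hInv1
      -- the A-side pre-pass seed list and B's comprehension seed list have the same members
      have hstepc : ∀ (s : List (Int × Int)) (c : Int) (x : Int × Int),
          x ∈ (let s' := if cellGet 0 A 0 c = 1 ∧ cellGet 0 A 1 c = 1
                  then s ++ [((1 : Int), c)] else s;
                if cellGet 0 A ((A.length : Int) - 1) c = 1 ∧
                    cellGet 0 A ((A.length : Int) - 2) c = 1
                  then s' ++ [((A.length : Int) - 2, c)] else s')
            ↔ (x ∈ s ∨
              (((cellGet 0 A 0 c = 1 ∧ cellGet 0 A 1 c = 1) ∧ x = ((1 : Int), c)) ∨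
               ((cellGet 0 A ((A.length : Int) - 1) c = 1 ∧
                  cellGet 0 A ((A.length : Int) - 2) c = 1) ∧
                x = ((A.length : Int) - 2, c)))) := by
        intro s c x
        dsimp only
        split_ifs <;> simp <;> tauto
      have hstepr : ∀ (s : List (Int × Int)) (r : Int) (x : Int × Int),
          x ∈ (let s' := if cellGet 0 A r 0 = 1 ∧ cellGet 0 A r 1 = 1
                  then s ++ [(r, (1 : Int))] else s;
                if cellGet 0 A r ((((A[0]?).getD []).length : Int) - 1) = 1 ∧
                    cellGet 0 A r ((((A[0]?).getD []).length : Int) - 2) = 1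
                  then s' ++ [(r, (((A[0]?).getD []).length : Int) - 2)] else s')
            ↔ (x ∈ s ∨
              (((cellGet 0 A r 0 = 1 ∧ cellGet 0 A r 1 = 1) ∧ x = (r, (1 : Int))) ∨
               ((cellGet 0 A r ((((A[0]?).getD []).length : Int) - 1) = 1 ∧
                  cellGet 0 A r ((((A[0]?).getD []).length : Int) - 2) = 1) ∧
                x = (r, (((A[0]?).getD []).length : Int) - 2)))) := by
        intro s r x
        dsimp only
        split_ifs <;> simp <;> tauto
      have hseed : ∀ x : Int × Int,
          x ∈ (((PySem.List.pyRange 1 ((((A[0]?).getD []).length : Int) - 1) 1).filter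
              (fun c => cellGet 0 A 0 c == 1 && cellGet 0 A 1 c == 1)).map
                (fun c => ((1 : Int), c))
            ++ ((PySem.List.pyRange 1 ((((A[0]?).getD []).length : Int) - 1) 1).filter
              (fun c => cellGet 0 A ((A.length : Int) - 1) c == 1 &&
                cellGet 0 A ((A.length : Int) - 2) c == 1)).map
                (fun c => ((A.length : Int) - 2, c))
            ++ ((PySem.List.pyRange 1 ((A.length : Int) - 1) 1).filter
              (fun r => cellGet 0 A r 0 == 1 && cellGet 0 A r 1 == 1)).map
                (fun r => (r, (1 : Int)))
            ++ ((PySem.List.pyRange 1 ((A.length : Int) - 1) 1).filter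
              (fun r => cellGet 0 A r ((((A[0]?).getD []).length : Int) - 1) == 1 &&
                cellGet 0 A r ((((A[0]?).getD []).length : Int) - 2) == 1)).map
                (fun r => (r, (((A[0]?).getD []).length : Int) - 2)))
          ↔ x ∈ ((PySem.List.pyRange 1 ((A.length : Int) - 1) 1).foldl (fun s r =>
              let s := if cellGet 0 A r 0 = 1 ∧ cellGet 0 A r 1 = 1
                then s ++ [(r, (1 : Int))] else s
              if cellGet 0 A r ((((A[0]?).getD []).length : Int) - 1) = 1 ∧
                  cellGet 0 A r ((((A[0]?).getD []).length : Int) - 2) = 1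
                then s ++ [(r, (((A[0]?).getD []).length : Int) - 2)] else s)
            ((PySem.List.pyRange 1 ((((A[0]?).getD []).length : Int) - 1) 1).foldl (fun s c =>
              let s := if cellGet 0 A 0 c = 1 ∧ cellGet 0 A 1 c = 1
                then s ++ [((1 : Int), c)] else s
              if cellGet 0 A ((A.length : Int) - 1) c = 1 ∧
                  cellGet 0 A ((A.length : Int) - 2) c = 1
                then s ++ [((A.length : Int) - 2, c)] else s) [])) := by
        intro x
        rw [foldl_mem_step _ _ hstepr, foldl_mem_step _ _ hstepc]
        simp only [List.mem_append, List.mem_map, List.mem_filter, Bool.and_eq_true,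
          beq_iff_eq, List.not_mem_nil, false_or]
        constructor
        · rintro (((⟨c, ⟨hc, h1, h2⟩, rfl⟩ | ⟨c, ⟨hc, h1, h2⟩, rfl⟩) |
              ⟨r, ⟨hr, h1, h2⟩, rfl⟩) | ⟨r, ⟨hr, h1, h2⟩, rfl⟩)
          · exact Or.inl ⟨c, hc, Or.inl ⟨⟨h1, h2⟩, rfl⟩⟩
          · exact Or.inl ⟨c, hc, Or.inr ⟨⟨h1, h2⟩, rfl⟩⟩
          · exact Or.inr ⟨r, hr, Or.inl ⟨⟨h1, h2⟩, rfl⟩⟩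
          · exact Or.inr ⟨r, hr, Or.inr ⟨⟨h1, h2⟩, rfl⟩⟩
        · rintro (⟨c, hc, (⟨⟨h1, h2⟩, rfl⟩ | ⟨⟨h1, h2⟩, rfl⟩)⟩ |
              ⟨r, hr, (⟨⟨h1, h2⟩, rfl⟩ | ⟨⟨h1, h2⟩, rfl⟩)⟩)
          · exact Or.inl (Or.inl (Or.inl ⟨c, ⟨hc, h1, h2⟩, rfl⟩))
          · exact Or.inl (Or.inl (Or.inr ⟨c, ⟨hc, h1, h2⟩, rfl⟩))
          · exact Or.inl (Or.inr ⟨r, ⟨hr, h1, h2⟩, rfl⟩)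
          · exact Or.inr ⟨r, ⟨hr, h1, h2⟩, rfl⟩
      exact mainCore hR2 hC2 hgood hInv2 hseed

-- ===== VERDICT (by name: the statement is the Claim_ definition above) =====
theorem numEnclaves1_spec : Claim_equal_numEnclaves1 := by
  intro A _ hpre
  exact numEnclaves1_eq_alt A hpre
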